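-- pv_equiv track=rewrite | github.com/zofy/PyCalc | calculator.py | find_multiple_ops
-- ===== SOURCE A (Python) =====
-- def find_multiple_ops(equation):
-- 	d = dict()
-- 	idx = -1
-- 	j = -1
-- 	for i, x in enumerate(equation):
-- 		if x in ('+', '-'):
-- 			if j == i:
-- 				d[idx].append(x)
-- 				j += 1
-- 			else:
-- 				d[i] = [x]
-- 				idx, j = i, i + 1
-- 	return d
-- ===== SOURCE B (Python) =====
-- def find_multiple_ops(equation):
--     d = {}
--     i = 0
--     n = len(equation)
--     while i < n:
--         if equation[i] in '+-':
--             j = i + 1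
--             while j < n and equation[j] in '+-':
--                 j += 1
--             d[i] = list(equation[i:j])
--             i = j
--         else:
--             i += 1
--     return d
-- ===== Notes on version B (the rewrite author's own statement) =====
-- stated objective: simpler
-- what changed: B replaces A's char-by-char loop that mutates a dict entry while tracking a start key and an expected-next-index counter with an index-jumping scan that extracts each maximal operator run wholesale (inner while + slice) and stores it in one assignment.
import Mathlib
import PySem

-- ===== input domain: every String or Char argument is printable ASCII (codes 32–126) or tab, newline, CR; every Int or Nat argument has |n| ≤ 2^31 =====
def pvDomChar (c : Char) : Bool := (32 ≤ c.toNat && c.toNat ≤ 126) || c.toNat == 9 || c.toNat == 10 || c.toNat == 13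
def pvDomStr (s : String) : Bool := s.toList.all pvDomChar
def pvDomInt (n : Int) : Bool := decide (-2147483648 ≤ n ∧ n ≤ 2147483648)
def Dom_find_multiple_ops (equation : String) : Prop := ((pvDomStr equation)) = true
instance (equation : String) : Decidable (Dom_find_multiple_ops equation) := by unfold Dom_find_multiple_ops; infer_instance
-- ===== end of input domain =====

-- B replaces A's char-by-char dict mutation with expected-next-index bookkeeping by an
-- index-jumping scan that extracts each maximal operator run wholesale (objective: simpler).

def pvIsOp (c : Char) : Bool := c == '+' || c == '-'

-- ===== PORT A =====
-- A's for-loop over enumerate(equation) with state (d, idx, j), as structural recursion.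
def pvLoopA (cs : List Char) (i : Int) (d : PySem.Dict Int (List String))
    (idx j : Int) : PySem.Dict Int (List String) :=
  match cs with
  | [] => d
  | x :: rest =>
    if pvIsOp x then
      if j = i then
        pvLoopA rest (i + 1) (d.modify idx [] (· ++ [String.ofList [x]])) idx (j + 1)
      else
        pvLoopA rest (i + 1) (d.insert i [String.ofList [x]]) i (i + 1)
    else
      pvLoopA rest (i + 1) d idx j

def find_multiple_ops (equation : String) : List (Int × List String) :=
  (pvLoopA equation.toList 0 PySem.Dict.empty (-1) (-1)).items

-- ===== PORT B =====
-- Source B's outer while-loop; the inner while that advances j to the end of the run is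
-- takeWhile/dropWhile, and equation[i:j] is that takeWhile prefix.
def pvScanB : List Char → Int → List (Int × List String)
  | [], _ => []
  | x :: rest, i =>
    if pvIsOp x then
      let run := x :: rest.takeWhile pvIsOp
      (i, run.map (fun c => String.ofList [c])) :: pvScanB (rest.dropWhile pvIsOp) (i + run.length)
    else
      pvScanB rest (i + 1)
termination_by cs _ => cs.length
decreasing_by
  · simp
    exact List.length_dropWhile_le _ _
  · simp

def find_multiple_ops_alt (equation : String) : List (Int × List String) :=
  pvScanB equation.toList 0

-- ===== PRECONDITION & SPEC =====
def Spec_find_multiple_ops (equation : String) (out : List (Int × List String)) : Prop := out = find_multiple_ops_alt equation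
instance (equation : String) (out : List (Int × List String)) : Decidable (Spec_find_multiple_ops equation out) := by unfold Spec_find_multiple_ops; infer_instance

-- ===== CLAIM (what is proved, stated in full; the proofs are below) =====
def Claim_equal_find_multiple_ops : Prop := ∀ (equation : String), Dom_find_multiple_ops equation → Spec_find_multiple_ops equation (find_multiple_ops equation)

-- ===== LEMMAS AND PROOFS =====

-- The two loop invariants, proved together by structural induction on the char list.
-- "closed" (first conjunct): no run is adjacent (j < i), all keys already in the dict are < i;
--   then A's loop appends exactly B's scan of the remaining characters.
-- "open" (second conjunct): the dict ends with the entry (idx, run), j = i (the previous char,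
--   at i - 1, was an operator of that run), keys before it are < idx < i; then A's loop first
--   extends that last entry with the pending operator prefix and then behaves like B's scan.
theorem pvCO (cs : List Char) :
    (∀ (i idx j : Int) (pre : List (Int × List String)),
        (∀ p ∈ pre, p.1 < i) → j < i →
        (pvLoopA cs i ⟨pre⟩ idx j).items = pre ++ pvScanB cs i)
    ∧ (∀ (i idx : Int) (pre : List (Int × List String)) (run : List String),
        (∀ p ∈ pre, p.1 < idx) → idx < i →
        (pvLoopA cs i ⟨pre ++ [(idx, run)]⟩ idx i).items
          = pre ++ (idx, run ++ (cs.takeWhile pvIsOp).map (fun c => String.ofList [c]))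
              :: pvScanB (cs.dropWhile pvIsOp) (i + (cs.takeWhile pvIsOp).length)) := by
  induction cs with
  | nil =>
    constructor
    · intro i idx j pre _ _
      simp [pvLoopA, pvScanB]
    · intro i idx pre run _ _
      simp [pvLoopA, pvScanB]
  | cons x rest ih =>
    obtain ⟨ihC, ihO⟩ := ih
    constructor
    · -- closed state
      intro i idx j pre hpre hj
      by_cases hop : pvIsOp x
      · have hne : ¬ j = i := by omega
        have hcont : (PySem.Dict.mk pre).contains i = false := by
          simp only [PySem.Dict.contains, List.any_eq_false]
          intro p hp
          have := hpre p hp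
          simp only [beq_iff_eq]
          omega
        have hins : (PySem.Dict.mk pre).insert i [String.ofList [x]]
            = PySem.Dict.mk (pre ++ [(i, [String.ofList [x]])]) := by
          simp [PySem.Dict.insert, hcont]
        rw [show pvLoopA (x :: rest) i ⟨pre⟩ idx j
              = pvLoopA rest (i + 1) ((PySem.Dict.mk pre).insert i [String.ofList [x]]) i (i + 1) by
            simp [pvLoopA, hop, hne]]
        rw [hins, ihO (i + 1) i pre [String.ofList [x]] hpre (by omega)]
        simp only [pvScanB, hop, if_pos]
        simp
        congr 1
        omega
      · rw [show pvLoopA (x :: rest) i ⟨pre⟩ idx j = pvLoopA rest (i + 1) ⟨pre⟩ idx j by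
            simp [pvLoopA, hop]]
        rw [ihC (i + 1) idx j pre (by intro p hp; have := hpre p hp; omega) (by omega)]
        simp [pvScanB, hop]
    · -- open state
      intro i idx pre run hpre hidx
      have hkne : ∀ p ∈ pre, p.1 ≠ idx := by
        intro p hp
        have := hpre p hp
        omega
      by_cases hop : pvIsOp x
      · -- extend the last entry
        have hcont : (PySem.Dict.mk (pre ++ [(idx, run)])).contains idx = true := by
          simp [PySem.Dict.contains]
        have hget : (PySem.Dict.mk (pre ++ [(idx, run)])).getD idx [] = run := by
          simp only [PySem.Dict.getD, PySem.Dict.get?]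
          rw [List.find?_append]
          have : List.find? (fun p => p.1 == idx) pre = none := by
            rw [List.find?_eq_none]
            intro p hp
            simp [hkne p hp]
          simp [this]
        have hid : ∀ p ∈ pre,
            (if (p.1 == idx) = true then (idx, run ++ [String.ofList [x]]) else p) = id p := by
          intro p hp
          simp [hkne p hp]
        have hmod : (PySem.Dict.mk (pre ++ [(idx, run)])).modify idx [] (· ++ [String.ofList [x]])
            = PySem.Dict.mk (pre ++ [(idx, run ++ [String.ofList [x]])]) := by
          simp only [PySem.Dict.modify, hget, PySem.Dict.insert, hcont, if_true]
          congr 1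
          rw [List.map_append, List.map_congr_left hid, List.map_id]
          simp
        rw [show pvLoopA (x :: rest) i ⟨pre ++ [(idx, run)]⟩ idx i
              = pvLoopA rest (i + 1)
                  ((PySem.Dict.mk (pre ++ [(idx, run)])).modify idx [] (· ++ [String.ofList [x]]))
                  idx (i + 1) by
            simp [pvLoopA, hop]]
        rw [hmod, ihO (i + 1) idx pre (run ++ [String.ofList [x]]) hpre (by omega)]
        simp [hop]
        congr 1
        omega
      · -- run is over2: the state closes
        rw [show pvLoopA (x :: rest) i ⟨pre ++ [(idx, run)]⟩ idx i
              = pvLoopA rest (i + 1) ⟨pre ++ [(idx, run)]⟩ idx i by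
            simp [pvLoopA, hop]]
        rw [ihC (i + 1) idx i (pre ++ [(idx, run)])
            (by intro p hp; simp at hp; rcases hp with hp | hp
                · have := hpre p hp; omega
                · rcases hp with ⟨h1, _⟩; omega)
            (by omega)]
        simp [pvScanB, hop]

-- ===== VERDICT (by name: the statement is the Claim_ definition above) =====
theorem find_multiple_ops_spec : Claim_equal_find_multiple_ops := by
  intro equation _
  show find_multiple_ops equation = find_multiple_ops_alt equation
  unfold find_multiple_ops find_multiple_ops_alt
  have := (pvCO equation.toList).1 0 (-1) (-1) [] (by simp) (by omega)
  simpa [PySem.Dict.empty] using this
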